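-- pv_equiv track=rewrite | github.com/abylsliam44/mylink | backend/app/services/ai/agents/relevance_scorer_agent.py | _best_lang_level
-- ===== SOURCE A (Python) =====
-- from typing import Any, Dict, List, Optional, Tuple
--
-- CEFR_ORDER = ["A1", "A2", "B1", "B2", "C1", "C2"]
--
-- def _best_lang_level(items: List[Dict[str, Any]]) -> Optional[str]:
--     best_idx = None
--     best_level = None
--     for it in items or []:
--         lvl = (it.get("level") or "").upper()
--         if lvl in CEFR_ORDER:
--             idx = CEFR_ORDER.index(lvl)
--             if best_idx is None or idx > best_idx:
--                 best_idx = idx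
--                 best_level = lvl
--     return best_level
-- ===== SOURCE B (Python) =====
-- CEFR_ORDER = ["A1", "A2", "B1", "B2", "C1", "C2"]
--
-- def _best_lang_level(items):
--     present = {(it.get("level") or "").upper() for it in items or []}
--     for lvl in reversed(CEFR_ORDER):
--         if lvl in present:
--             return lvl
--     return None
-- ===== Notes on version B (the rewrite author's own statement) =====
-- stated objective: simpler
-- what changed: Instead of scanning items while tracking a running argmax index, B builds a set of normalized present levels once and returns the first match scanning CEFR_ORDER from highest to lowest.
import Mathlib
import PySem

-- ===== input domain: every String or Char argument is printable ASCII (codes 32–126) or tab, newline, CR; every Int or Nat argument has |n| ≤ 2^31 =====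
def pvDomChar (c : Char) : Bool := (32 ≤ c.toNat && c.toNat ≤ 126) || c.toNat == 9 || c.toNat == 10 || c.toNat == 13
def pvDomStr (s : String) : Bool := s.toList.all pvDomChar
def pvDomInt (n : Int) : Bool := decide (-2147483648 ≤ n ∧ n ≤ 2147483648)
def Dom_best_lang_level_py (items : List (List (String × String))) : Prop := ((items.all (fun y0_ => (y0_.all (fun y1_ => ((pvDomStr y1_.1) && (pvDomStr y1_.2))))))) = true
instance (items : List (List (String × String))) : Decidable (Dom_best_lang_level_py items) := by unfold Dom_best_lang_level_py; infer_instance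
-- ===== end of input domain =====

-- B replaces A's running-argmax scan over the items by a one-shot set of present
-- normalized levels scanned against CEFR_ORDER from highest to lowest (objective: simpler).

-- ===== PORT A =====
def CEFR_ORDER : List String := ["A1", "A2", "B1", "B2", "C1", "C2"]

-- lvl = (it.get("level") or "").upper()  — 'or ""' maps None to ""; an empty string stays "".
def pvKey (it : List (String × String)) : String :=
  PySem.Str.upper ((it.lookup "level").getD "")  -- dict-as-assoc-list: first match

-- one iteration of A's for-loop over the state (best_idx, best_level)
def pvStepA (st : Option Int × Option String) (it : List (String × String)) :
    Option Int × Option String :=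
  let lvl := pvKey it
  if lvl ∈ CEFR_ORDER then
    let idx : Int := ((PySem.List.index? CEFR_ORDER lvl).getD 0 : Nat)
    match st.1 with
    | none => (some idx, some lvl)
    | some b => if idx > b then (some idx, some lvl) else st
  else st

def best_lang_level_py (items : List (List (String × String))) : Option String :=
  (items.foldl pvStepA (none, none)).2

-- ===== PORT B =====
def best_lang_level_py_alt (items : List (List (String × String))) : Option String :=
  let present : PySem.Set String := PySem.Set.ofList (items.map pvKey)
  CEFR_ORDER.reverse.find? (fun lvl => PySem.Set.contains present lvl)

-- ===== PRECONDITION & SPEC =====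
def Spec_best_lang_level_py (items : List (List (String × String))) (out : Option String) : Prop := out = best_lang_level_py_alt items
instance (items : List (List (String × String))) (out : Option String) : Decidable (Spec_best_lang_level_py items out) := by unfold Spec_best_lang_level_py; infer_instance

-- ===== CLAIM (what is proved, stated in full; the proofs are below) =====
def Claim_equal_best_lang_level_py : Prop := ∀ (items : List (List (String × String))), Dom_best_lang_level_py items → Spec_best_lang_level_py items (best_lang_level_py items)

-- ===== LEMMAS AND PROOFS =====

-- the highest CEFR level among a list of (already normalized) level strings
def pvBest (ks : List String) : Option String :=
  if "C2" ∈ ks then some "C2" else if "C1" ∈ ks then some "C1"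
  else if "B2" ∈ ks then some "B2" else if "B1" ∈ ks then some "B1"
  else if "A2" ∈ ks then some "A2" else if "A1" ∈ ks then some "A1" else none

def pvRnk : Option String → Option Int
  | some "A1" => some 0 | some "A2" => some 1 | some "B1" => some 2
  | some "B2" => some 3 | some "C1" => some 4 | some "C2" => some 5
  | _ => none

def pvEnc (ks : List String) : Option Int × Option String := (pvRnk (pvBest ks), pvBest ks)

theorem pvMemC2 : "C2" ∈ CEFR_ORDER := by simp [CEFR_ORDER]
theorem pvIdxC2 : PySem.List.index? CEFR_ORDER "C2" = some 5 := by
  simp [CEFR_ORDER, PySem.List.index?_eq_idxOf?, List.idxOf?, List.findIdx?_cons]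
theorem pvMemC1 : "C1" ∈ CEFR_ORDER := by simp [CEFR_ORDER]
theorem pvIdxC1 : PySem.List.index? CEFR_ORDER "C1" = some 4 := by
  simp [CEFR_ORDER, PySem.List.index?_eq_idxOf?, List.idxOf?, List.findIdx?_cons]
theorem pvMemB2 : "B2" ∈ CEFR_ORDER := by simp [CEFR_ORDER]
theorem pvIdxB2 : PySem.List.index? CEFR_ORDER "B2" = some 3 := by
  simp [CEFR_ORDER, PySem.List.index?_eq_idxOf?, List.idxOf?, List.findIdx?_cons]
theorem pvMemB1 : "B1" ∈ CEFR_ORDER := by simp [CEFR_ORDER]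
theorem pvIdxB1 : PySem.List.index? CEFR_ORDER "B1" = some 2 := by
  simp [CEFR_ORDER, PySem.List.index?_eq_idxOf?, List.idxOf?, List.findIdx?_cons]
theorem pvMemA2 : "A2" ∈ CEFR_ORDER := by simp [CEFR_ORDER]
theorem pvIdxA2 : PySem.List.index? CEFR_ORDER "A2" = some 1 := by
  simp [CEFR_ORDER, PySem.List.index?_eq_idxOf?, List.idxOf?, List.findIdx?_cons]
theorem pvMemA1 : "A1" ∈ CEFR_ORDER := by simp [CEFR_ORDER]
theorem pvIdxA1 : PySem.List.index? CEFR_ORDER "A1" = some 0 := by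
  simp [CEFR_ORDER, PySem.List.index?_eq_idxOf?, List.idxOf?, List.findIdx?_cons]

theorem pvRevCEFR : CEFR_ORDER.reverse = ["C2", "C1", "B2", "B1", "A2", "A1"] := by
  simp [CEFR_ORDER]

theorem pvPart (ks : List String) :
    ("C2" ∈ ks) ∨ ("C2" ∉ ks ∧ "C1" ∈ ks) ∨ ("C2" ∉ ks ∧ "C1" ∉ ks ∧ "B2" ∈ ks)
    ∨ ("C2" ∉ ks ∧ "C1" ∉ ks ∧ "B2" ∉ ks ∧ "B1" ∈ ks)
    ∨ ("C2" ∉ ks ∧ "C1" ∉ ks ∧ "B2" ∉ ks ∧ "B1" ∉ ks ∧ "A2" ∈ ks)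
    ∨ ("C2" ∉ ks ∧ "C1" ∉ ks ∧ "B2" ∉ ks ∧ "B1" ∉ ks ∧ "A2" ∉ ks ∧ "A1" ∈ ks)
    ∨ ("C2" ∉ ks ∧ "C1" ∉ ks ∧ "B2" ∉ ks ∧ "B1" ∉ ks ∧ "A2" ∉ ks ∧ "A1" ∉ ks) := by
  tauto

set_option maxHeartbeats 1000000 in
theorem pvStepA_enc (ks : List String) (it : List (String × String)) :
    pvStepA (pvEnc ks) it = pvEnc (ks ++ [pvKey it]) := by
  simp only [pvStepA]
  generalize pvKey it = k
  rcases (show k = "C2" ∨ k = "C1" ∨ k = "B2" ∨ k = "B1" ∨ k = "A2" ∨ k = "A1" ∨ k ∉ CEFR_ORDER by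
      by_cases h : k ∈ CEFR_ORDER
      · simp only [CEFR_ORDER, List.mem_cons, List.not_mem_nil, or_false] at h; tauto
      · tauto) with h|h|h|h|h|h|h
  · subst h
    rw [if_pos pvMemC2, pvIdxC2]
    rcases pvPart ks with h|h|h|h|h|h|h <;>
      simp_all [pvEnc, pvBest, pvRnk, List.mem_append, List.mem_cons, List.not_mem_nil]
  · subst h
    rw [if_pos pvMemC1, pvIdxC1]
    rcases pvPart ks with h|h|h|h|h|h|h <;>
      simp_all [pvEnc, pvBest, pvRnk, List.mem_append, List.mem_cons, List.not_mem_nil]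
  · subst h
    rw [if_pos pvMemB2, pvIdxB2]
    rcases pvPart ks with h|h|h|h|h|h|h <;>
      simp_all [pvEnc, pvBest, pvRnk, List.mem_append, List.mem_cons, List.not_mem_nil]
  · subst h
    rw [if_pos pvMemB1, pvIdxB1]
    rcases pvPart ks with h|h|h|h|h|h|h <;>
      simp_all [pvEnc, pvBest, pvRnk, List.mem_append, List.mem_cons, List.not_mem_nil]
  · subst h
    rw [if_pos pvMemA2, pvIdxA2]
    rcases pvPart ks with h|h|h|h|h|h|h <;>
      simp_all [pvEnc, pvBest, pvRnk, List.mem_append, List.mem_cons, List.not_mem_nil]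
  · subst h
    rw [if_pos pvMemA1, pvIdxA1]
    rcases pvPart ks with h|h|h|h|h|h|h <;>
      simp_all [pvEnc, pvBest, pvRnk, List.mem_append, List.mem_cons, List.not_mem_nil]
  · rw [if_neg h]
    have hn : ∀ L ∈ CEFR_ORDER, ¬ (L = k) := fun L hL e => h (e ▸ hL)
    have c2 := hn _ pvMemC2; have c1 := hn _ pvMemC1
    have b2 := hn _ pvMemB2; have b1 := hn _ pvMemB1
    have a2 := hn _ pvMemA2; have a1 := hn _ pvMemA1
    simp only [pvEnc, pvBest, List.mem_append, List.mem_cons, List.not_mem_nil, or_false]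
    simp [c2, c1, b2, b1, a2, a1]

theorem pv_foldA (xs : List (List (String × String))) :
    ∀ ks, xs.foldl pvStepA (pvEnc ks) = pvEnc (ks ++ xs.map pvKey) := by
  induction xs with
  | nil => intro ks; simp
  | cons x xs ih =>
      intro ks
      simp only [List.foldl_cons, List.map_cons, pvStepA_enc]
      rw [ih (ks ++ [pvKey x])]
      simp

theorem pvA_eq (items : List (List (String × String))) :
    best_lang_level_py items = pvBest (items.map pvKey) := by
  have h0 : pvEnc ([] : List String) = (none, none) := by simp [pvEnc, pvBest, pvRnk]
  unfold best_lang_level_py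
  rw [← h0, pv_foldA]
  simp [pvEnc]

set_option maxHeartbeats 1000000 in
theorem pvB_eq (items : List (List (String × String))) :
    best_lang_level_py_alt items = pvBest (items.map pvKey) := by
  show (CEFR_ORDER.reverse.find? fun lvl =>
    PySem.Set.contains (PySem.Set.ofList (items.map pvKey)) lvl) = _
  rw [pvRevCEFR]
  by_cases h5 : "C2" ∈ items.map pvKey
  · rw [List.find?_cons_of_pos (by simp [h5])]; simp [pvBest, h5]
  · rw [List.find?_cons_of_neg (by simp [h5])]
    by_cases h4 : "C1" ∈ items.map pvKey
    · rw [List.find?_cons_of_pos (by simp [h4])]; simp [pvBest, h5, h4]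
    · rw [List.find?_cons_of_neg (by simp [h4])]
      by_cases h3 : "B2" ∈ items.map pvKey
      · rw [List.find?_cons_of_pos (by simp [h3])]; simp [pvBest, h5, h4, h3]
      · rw [List.find?_cons_of_neg (by simp [h3])]
        by_cases h2 : "B1" ∈ items.map pvKey
        · rw [List.find?_cons_of_pos (by simp [h2])]; simp [pvBest, h5, h4, h3, h2]
        · rw [List.find?_cons_of_neg (by simp [h2])]
          by_cases h1 : "A2" ∈ items.map pvKey
          · rw [List.find?_cons_of_pos (by simp [h1])]; simp [pvBest, h5, h4, h3, h2, h1]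
          · rw [List.find?_cons_of_neg (by simp [h1])]
            by_cases h0 : "A1" ∈ items.map pvKey
            · rw [List.find?_cons_of_pos (by simp [h0])]
              simp [pvBest, h5, h4, h3, h2, h1, h0]
            · rw [List.find?_cons_of_neg (by simp [h0])]
              simp [pvBest, h5, h4, h3, h2, h1, h0]

-- ===== VERDICT (by name: the statement is the Claim_ definition above) =====
theorem best_lang_level_py_spec : Claim_equal_best_lang_level_py := by
  intro items _
  unfold Spec_best_lang_level_py
  rw [pvA_eq, pvB_eq]
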